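-- pv_equiv track=rewrite | github.com/Brownster/YAML-format-fixer | app.py | adjust_comment_indentation
-- ===== SOURCE A (Python) =====
-- def adjust_comment_indentation(lines):
--     new_lines = []  # Ensure new_lines is initialized
--     for i, line in enumerate(lines):
--         stripped_line = line.lstrip()
--         if stripped_line.startswith("#"):
--             next_line_index = i + 1
--             while next_line_index < len(lines) and not lines[next_line_index].strip():
--                 next_line_index += 1
--             if next_line_index < len(lines):
--                 next_line_indentation = len(lines[next_line_index]) - len(lines[next_line_index].lstrip())
--                 line = " " * next_line_indentation + stripped_line
--         new_lines.append(line)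
--     return new_lines  # Return the new_lines list
-- ===== SOURCE B (Python) =====
-- def adjust_comment_indentation(lines):
--     next_indent = None  # original indentation of the most recently seen non-blank line
--     result = []
--     for line in reversed(lines):
--         if not line.strip():
--             result.append(line)
--             continue
--         stripped = line.lstrip()
--         if stripped.startswith("#") and next_indent is not None:
--             result.append(" " * next_indent + stripped)
--         else:
--             result.append(line)
--         next_indent = len(line) - len(stripped)
--     result.reverse()
--     return result
-- ===== Notes on version B (the rewrite author's own statement) =====
-- stated objective: alternative
-- what changed: Replaced A's per-comment forward scan for the next non-blank line by a single backward pass that carries the last seen non-blank line's original indentation as state.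
import Mathlib
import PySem

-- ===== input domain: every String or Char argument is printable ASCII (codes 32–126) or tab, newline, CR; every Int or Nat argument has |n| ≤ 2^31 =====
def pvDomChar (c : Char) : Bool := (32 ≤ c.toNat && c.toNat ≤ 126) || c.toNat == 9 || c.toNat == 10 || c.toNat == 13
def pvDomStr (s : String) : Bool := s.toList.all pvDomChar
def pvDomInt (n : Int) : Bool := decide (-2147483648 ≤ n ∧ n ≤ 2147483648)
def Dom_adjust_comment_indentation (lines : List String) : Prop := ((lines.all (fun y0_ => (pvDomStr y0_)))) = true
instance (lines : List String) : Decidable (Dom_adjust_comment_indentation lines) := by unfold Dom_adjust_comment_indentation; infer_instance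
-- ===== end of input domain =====

-- B replaces A's per-comment forward scan for the next non-blank line by one backward pass carrying that line's indentation as state (objective: alternative).

-- ===== PORT A =====
-- the inner 'while next_line_index < len(lines) and not lines[next_line_index].strip(): next_line_index += 1'
def pvScanA (lines : List String) (j : Int) : Int :=
  if h : j < (lines.length : Int) then
    if PySem.Chars.strip (PySem.List.pyGetD lines j "").toList = [] then
      pvScanA lines (j + 1)
    else j
  else j
termination_by ((lines.length : Int) - j).toNat
decreasing_by omega

def adjust_comment_indentation (lines : List String) : List String :=
  (PySem.List.enumerate lines).foldl
    (fun new_lines p =>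
      let line := p.2
      let stripped_line := PySem.Chars.lstrip line.toList
      let line :=
        if PySem.Chars.startswith stripped_line ['#'] then
          let next_line_index := pvScanA lines (p.1 + 1)
          if next_line_index < (lines.length : Int) then
            let nl := (PySem.List.pyGetD lines next_line_index "").toList
            String.ofList (List.replicate (nl.length - (PySem.Chars.lstrip nl).length) ' ' ++ stripped_line)
          else line
        else line
      new_lines ++ [line]) []

-- ===== PORT B =====
def adjust_comment_indentation_alt (lines : List String) : List String :=
  (lines.foldr
    (fun line st =>
      let cs := line.toList
      if PySem.Chars.strip cs = [] then (st.1, line :: st.2)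
      else
        let stripped := PySem.Chars.lstrip cs
        let fixed :=
          if PySem.Chars.startswith stripped ['#'] then
            match st.1 with
            | some k => String.ofList (List.replicate k ' ' ++ stripped)
            | none => line
          else line
        (some (cs.length - stripped.length), fixed :: st.2))
    ((none : Option Nat), ([] : List String))).2

-- ===== PRECONDITION & SPEC =====
def Spec_adjust_comment_indentation (lines : List String) (out : List String) : Prop := out = adjust_comment_indentation_alt lines
instance (lines : List String) (out : List String) : Decidable (Spec_adjust_comment_indentation lines out) := by unfold Spec_adjust_comment_indentation; infer_instance

-- ===== CLAIM (what is proved, stated in full; the proofs are below) =====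
def Claim_equal_adjust_comment_indentation : Prop := ∀ (lines : List String), Dom_adjust_comment_indentation lines → Spec_adjust_comment_indentation lines (adjust_comment_indentation lines)

-- ===== LEMMAS AND PROOFS =====

-- the original indentation of the first non-blank line of ls, if any
def pvNextInd : List String → Option Nat
  | [] => none
  | l :: ls =>
      if PySem.Chars.strip l.toList = [] then pvNextInd ls
      else some (l.toList.length - (PySem.Chars.lstrip l.toList).length)

-- how one line is rewritten given the indentation of the next non-blank line
def pvFix (line : String) (o : Option Nat) : String :=
  if PySem.Chars.startswith (PySem.Chars.lstrip line.toList) ['#'] then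
    match o with
    | some k => String.ofList (List.replicate k ' ' ++ PySem.Chars.lstrip line.toList)
    | none => line
  else line

-- A's per-element body, as a function of the whole list and the (index, line) pair
def pvBodyA (lines : List String) (p : Int × String) : String :=
  let stripped_line := PySem.Chars.lstrip p.2.toList
  if PySem.Chars.startswith stripped_line ['#'] then
    let j := pvScanA lines (p.1 + 1)
    if j < (lines.length : Int) then
      let nl := (PySem.List.pyGetD lines j "").toList
      String.ofList (List.replicate (nl.length - (PySem.Chars.lstrip nl).length) ' ' ++ stripped_line)
    else p.2
  else p.2

lemma pvLstripNil (cs : List Char) (h : PySem.Chars.strip cs = []) : PySem.Chars.lstrip cs = [] := by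
  unfold PySem.Chars.strip PySem.Chars.rstrip at h
  rw [List.reverse_eq_nil_iff, List.dropWhile_eq_nil_iff] at h
  cases hx : PySem.Chars.lstrip cs with
  | nil => rfl
  | cons c t =>
    have hne : cs.dropWhile PySem.Chars.isspace ≠ [] := by
      rw [PySem.Chars.lstrip] at hx; rw [hx]; simp
    have hc : PySem.Chars.isspace ((cs.dropWhile PySem.Chars.isspace).head hne) = false :=
      List.head_dropWhile_not PySem.Chars.isspace hne
    have hcc : (cs.dropWhile PySem.Chars.isspace).head hne = c := by
      rw [PySem.Chars.lstrip] at hx; simp [hx]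
    have hcmem : PySem.Chars.isspace c = true := by
      apply h; rw [List.mem_reverse, hx]; exact List.mem_cons_self
    rw [hcc] at hc; exact absurd hcmem (by simp [hc])

lemma adjust_eq_map (lines : List String) :
    adjust_comment_indentation lines = (PySem.List.enumerate lines).map (pvBodyA lines) := by
  unfold adjust_comment_indentation
  rw [PySem.List.foldl_append_singleton_eq_map]
  rfl

lemma pvScanA_cons (l : String) (ls : List String) :
    ∀ j : Nat, pvScanA (l :: ls) ((j : Int) + 1) = pvScanA ls (j : Int) + 1 := by
  intro j
  induction hn : ls.length - j using Nat.strong_induction_on generalizing j with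
  | _ n ih =>
    conv_lhs => rw [pvScanA]
    conv_rhs => rw [pvScanA]
    by_cases hj : (j : Int) < (ls.length : Int)
    · have hjn : j < ls.length := by exact_mod_cast hj
      have hj1 : (j : Int) + 1 < ((l :: ls).length : Int) := by
        rw [List.length_cons]; push_cast; omega
      rw [dif_pos hj1, dif_pos hj]
      have hget : PySem.List.pyGetD (l :: ls) ((j : Int) + 1) "" = PySem.List.pyGetD ls (j : Int) "" := by
        have e : (j : Int) + 1 = ((j + 1 : Nat) : Int) := by push_cast; ring
        rw [e, PySem.List.pyGetD_natCast, PySem.List.pyGetD_natCast]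
        simp
      rw [hget]
      by_cases hb : PySem.Chars.strip (PySem.List.pyGetD ls (j : Int) "").toList = []
      · rw [if_pos hb, if_pos hb]
        have e1 : (j : Int) + 1 + 1 = ((j + 1 : Nat) : Int) + 1 := by push_cast; ring
        have e2 : (j : Int) + 1 = ((j + 1 : Nat) : Int) := by push_cast; ring
        rw [e1, e2]
        exact ih (ls.length - (j + 1)) (by omega) (j + 1) rfl
      · rw [if_neg hb, if_neg hb]
    · have hj1 : ¬ ((j : Int) + 1 < ((l :: ls).length : Int)) := by
        rw [List.length_cons]; push_cast; omega
      rw [dif_neg hj1, dif_neg hj]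

lemma pvScanA_nonneg (ls : List String) (j : Int) (hj : 0 ≤ j) : 0 ≤ pvScanA ls j := by
  induction hn : ((ls.length : Int) - j).toNat using Nat.strong_induction_on generalizing j with
  | _ n ih =>
    rw [pvScanA]
    by_cases h : j < (ls.length : Int)
    · rw [dif_pos h]
      split
      · exact ih ((ls.length : Int) - (j + 1)).toNat (by omega) (j + 1) (by omega) rfl
      · exact hj
    · rw [dif_neg h]; exact hj

-- pvNextInd read off from A's scan starting at 0
lemma scan_nextInd (ls : List String) :
    pvNextInd ls =
      if pvScanA ls 0 < (ls.length : Int) then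
        some ((PySem.List.pyGetD ls (pvScanA ls 0) "").toList.length -
              (PySem.Chars.lstrip (PySem.List.pyGetD ls (pvScanA ls 0) "").toList).length)
      else none := by
  induction ls with
  | nil =>
    rw [pvScanA]
    simp [pvNextInd]
  | cons l ls ih =>
    conv_rhs => rw [pvScanA]
    have h0 : (0 : Int) < ((l :: ls).length : Int) := by
      rw [List.length_cons]; push_cast; omega
    rw [dif_pos h0]
    have hget0 : PySem.List.pyGetD (l :: ls) (0 : Int) "" = l := by
      rw [show (0 : Int) = ((0 : Nat) : Int) from rfl, PySem.List.pyGetD_natCast]; rfl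
    rw [hget0]
    by_cases hb : PySem.Chars.strip l.toList = []
    · rw [if_pos hb]
      have hsh := pvScanA_cons l ls 0
      simp only [Nat.cast_zero] at hsh
      rw [hsh]
      have hnn : 0 ≤ pvScanA ls 0 := pvScanA_nonneg ls 0 le_rfl
      obtain ⟨k, hk⟩ : ∃ k : Nat, pvScanA ls 0 = (k : Int) := ⟨(pvScanA ls 0).toNat, by omega⟩
      have hget : PySem.List.pyGetD (l :: ls) (pvScanA ls 0 + 1) "" = PySem.List.pyGetD ls (pvScanA ls 0) "" := by
        rw [hk]
        rw [show (k : Int) + 1 = ((k + 1 : Nat) : Int) from by push_cast; ring,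
            PySem.List.pyGetD_natCast, PySem.List.pyGetD_natCast]
        simp
      rw [hget]
      rw [show pvNextInd (l :: ls) = pvNextInd ls from by rw [pvNextInd, if_pos hb], ih]
      have hlt : (pvScanA ls 0 + 1 < ((l :: ls).length : Int)) ↔ (pvScanA ls 0 < (ls.length : Int)) := by
        rw [List.length_cons]; push_cast; omega
      by_cases hcond : pvScanA ls 0 < (ls.length : Int)
      · rw [if_pos hcond, if_pos (hlt.mpr hcond)]
      · rw [if_neg hcond, if_neg (fun h => hcond (hlt.mp h))]
    · rw [if_neg hb, if_pos h0, hget0, pvNextInd, if_neg hb]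

-- A's body at index i+1 in (l :: ls) is its body at index i in ls
lemma bodyA_shift (l : String) (ls : List String) (i : Nat) (x : String) :
    pvBodyA (l :: ls) ((i : Int) + 1, x) = pvBodyA ls ((i : Int), x) := by
  unfold pvBodyA
  simp only
  have hsh : pvScanA (l :: ls) ((i : Int) + 1 + 1) = pvScanA ls ((i : Int) + 1) + 1 := by
    rw [show (i : Int) + 1 = ((i + 1 : Nat) : Int) from by push_cast; ring]
    exact pvScanA_cons l ls (i + 1)
  rw [hsh]
  have hnn : 0 ≤ pvScanA ls ((i : Int) + 1) := pvScanA_nonneg ls ((i : Int) + 1) (by omega)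
  obtain ⟨k, hk⟩ : ∃ k : Nat, pvScanA ls ((i : Int) + 1) = (k : Int) :=
    ⟨(pvScanA ls ((i : Int) + 1)).toNat, by omega⟩
  have hget : PySem.List.pyGetD (l :: ls) (pvScanA ls ((i : Int) + 1) + 1) "" =
      PySem.List.pyGetD ls (pvScanA ls ((i : Int) + 1)) "" := by
    rw [hk]
    rw [show (k : Int) + 1 = ((k + 1 : Nat) : Int) from by push_cast; ring,
        PySem.List.pyGetD_natCast, PySem.List.pyGetD_natCast]
    simp
  rw [hget]
  have hlt : (pvScanA ls ((i : Int) + 1) + 1 < ((l :: ls).length : Int)) ↔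
      (pvScanA ls ((i : Int) + 1) < (ls.length : Int)) := by
    rw [List.length_cons]; push_cast; omega
  by_cases hcond : pvScanA ls ((i : Int) + 1) < (ls.length : Int)
  · rw [if_pos (hlt.mpr hcond), if_pos hcond]
  · rw [if_neg (fun h => hcond (hlt.mp h)), if_neg hcond]

lemma enum_map_shift (g h : Int × String → String)
    (hgh : ∀ (i : Nat) (x : String), g ((i : Int) + 1, x) = h ((i : Int), x)) :
    ∀ (ls : List String) (s : Nat),
      (PySem.List.enumerate ls ((s : Int) + 1)).map g = (PySem.List.enumerate ls (s : Int)).map h := by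
  intro ls
  induction ls with
  | nil => intro s; simp [PySem.List.enumerate_nil]
  | cons x ls ih =>
    intro s
    rw [PySem.List.enumerate_cons, PySem.List.enumerate_cons, List.map_cons, List.map_cons, hgh s x]
    congr 1
    rw [show (s : Int) + 1 + 1 = ((s + 1 : Nat) : Int) + 1 from by push_cast; ring,
        show (s : Int) + 1 = ((s + 1 : Nat) : Int) from by push_cast; ring]
    exact ih (s + 1)

lemma adjust_cons (l : String) (ls : List String) :
    adjust_comment_indentation (l :: ls) = pvFix l (pvNextInd ls) :: adjust_comment_indentation ls := by
  rw [adjust_eq_map, adjust_eq_map, PySem.List.enumerate_cons, List.map_cons]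
  congr 1
  · -- head
    unfold pvBodyA pvFix
    simp only
    have hsh := pvScanA_cons l ls 0
    simp only [Nat.cast_zero] at hsh
    rw [hsh, scan_nextInd]
    by_cases hc : PySem.Chars.startswith (PySem.Chars.lstrip l.toList) ['#']
    · rw [if_pos hc, if_pos hc]
      have hnn : 0 ≤ pvScanA ls 0 := pvScanA_nonneg ls 0 le_rfl
      obtain ⟨k, hk⟩ : ∃ k : Nat, pvScanA ls 0 = (k : Int) := ⟨(pvScanA ls 0).toNat, by omega⟩
      have hget : PySem.List.pyGetD (l :: ls) (pvScanA ls 0 + 1) "" = PySem.List.pyGetD ls (pvScanA ls 0) "" := by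
        rw [hk]
        rw [show (k : Int) + 1 = ((k + 1 : Nat) : Int) from by push_cast; ring,
            PySem.List.pyGetD_natCast, PySem.List.pyGetD_natCast]
        simp
      rw [hget]
      have hlt : (pvScanA ls 0 + 1 < ((l :: ls).length : Int)) ↔ (pvScanA ls 0 < (ls.length : Int)) := by
        rw [List.length_cons]; push_cast; omega
      by_cases hcond : pvScanA ls 0 < (ls.length : Int)
      · rw [if_pos (hlt.mpr hcond), if_pos hcond]
      · rw [if_neg (fun h => hcond (hlt.mp h)), if_neg hcond]
    · rw [if_neg hc, if_neg hc]
  · -- tail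
    have := enum_map_shift (pvBodyA (l :: ls)) (pvBodyA ls) (bodyA_shift l ls) ls 0
    simp only [Nat.cast_zero] at this
    rw [this]

-- B's backward pass: its step function, named so the fold unfolds one line at a time
def pvStepB (line : String) (st : Option Nat × List String) : Option Nat × List String :=
  let cs := line.toList
  if PySem.Chars.strip cs = [] then (st.1, line :: st.2)
  else
    let stripped := PySem.Chars.lstrip cs
    let fixed :=
      if PySem.Chars.startswith stripped ['#'] then
        match st.1 with
        | some k => String.ofList (List.replicate k ' ' ++ stripped)
        | none => line
      else line
    (some (cs.length - stripped.length), fixed :: st.2)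

lemma pvStepB_eq (line : String) (st : Option Nat × List String) :
    pvStepB line st =
      if PySem.Chars.strip line.toList = [] then (st.1, line :: st.2)
      else (some (line.toList.length - (PySem.Chars.lstrip line.toList).length),
            pvFix line st.1 :: st.2) := by
  unfold pvStepB pvFix
  by_cases hb : PySem.Chars.strip line.toList = []
  · rw [if_pos hb]
  · rw [if_neg hb]

lemma alt_foldr (lines : List String) :
    adjust_comment_indentation_alt lines =
      (lines.foldr pvStepB ((none : Option Nat), ([] : List String))).2 := rfl

lemma foldr_fst (ls : List String) :
    (ls.foldr pvStepB ((none : Option Nat), ([] : List String))).1 = pvNextInd ls := by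
  induction ls with
  | nil => rfl
  | cons l ls ih =>
    rw [List.foldr_cons, pvNextInd, pvStepB_eq]
    by_cases hb : PySem.Chars.strip l.toList = []
    · rw [if_pos hb, if_pos hb]; exact ih
    · rw [if_neg hb, if_neg hb]

lemma alt_cons (l : String) (ls : List String) :
    adjust_comment_indentation_alt (l :: ls) =
      pvFix l (pvNextInd ls) :: adjust_comment_indentation_alt ls := by
  rw [alt_foldr, alt_foldr, List.foldr_cons, pvStepB_eq]
  by_cases hb : PySem.Chars.strip l.toList = []
  · rw [if_pos hb]
    have hfix : pvFix l (pvNextInd ls) = l := by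
      unfold pvFix
      rw [pvLstripNil l.toList hb]
      rfl
    rw [hfix]
  · rw [if_neg hb, foldr_fst]

lemma pvMain (lines : List String) :
    adjust_comment_indentation lines = adjust_comment_indentation_alt lines := by
  induction lines with
  | nil => rfl
  | cons l ls ih => rw [adjust_cons, alt_cons, ih]

-- ===== VERDICT (by name: the statement is the Claim_ definition above) =====
theorem adjust_comment_indentation_spec : Claim_equal_adjust_comment_indentation := by
  intro lines _
  unfold Spec_adjust_comment_indentation
  exact pvMain lines
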